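-- pv_equiv track=rewrite | github.com/Thomas-Rammos/- | krwsky.py | calculate_delays
-- ===== SOURCE A (Python) =====
-- from collections import defaultdict
--
-- def node_busy_intervals(start_times, edges_info):
--     """
--     Υπολογίζει τα busy intervals για κάθε κόμβο.
--     busy[node] = [(start, end), ...]
--     """
--     busy = defaultdict(list)
--     for e_id, s_time in start_times.items():
--         n1, n2, w = edges_info[e_id]
--         busy[n1].append((s_time, s_time + w))
--         busy[n2].append((s_time, s_time + w))
--     for node in busy:
--         busy[node].sort(key=lambda x: x[0])
--     return busy
--
-- def find_availability_intervals(busy_intervals, end_time):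
--     """
--     Εύρεση διαστημάτων διαθεσιμότητας ενός κόμβου μέχρι end_time.
--     """
--     available = []
--     current_start = 0
--     for (b_start, b_end) in busy_intervals:
--         if b_start >= end_time:
--             break
--         if b_start > current_start:
--             free_end = min(b_start, end_time)
--             if free_end > current_start:
--                 available.append((current_start, free_end))
--         current_start = max(current_start, b_end)
--         if current_start >= end_time:
--             break
--     if current_start < end_time:
--         available.append((current_start, end_time))
--     return available
--
-- def intersect_intervals(intervals_a, intervals_b):
--     """
--     Τέμνει δύο λίστες διαστημάτων, επιστρέφοντας τα κοινά διαθέσιμα διαστήματα.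
--     """
--     i, j = 0, 0
--     result = []
--     while i < len(intervals_a) and j < len(intervals_b):
--         a_start, a_end = intervals_a[i]
--         b_start, b_end = intervals_b[j]
--         start_int = max(a_start, b_start)
--         end_int = min(a_end, b_end)
--         if start_int < end_int:
--             result.append((start_int, end_int))
--
--         if a_end < b_end:
--             i += 1
--         else:
--             j += 1
--     return result
--
-- def calculate_delays(edges, start_times, edges_info):
--     """
--     Υπολογίζει delay για κάθε ακμή.
--     """
--     busy = node_busy_intervals(start_times, edges_info)
--     delays = {}
--     for (e_id, u, v, w) in edges:
--         s_e = start_times[e_id]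
--         if s_e == 0:
--             delays[e_id] = 0
--             continue
--
--         u_available = find_availability_intervals(busy[u], s_e)
--         v_available = find_availability_intervals(busy[v], s_e)
--         common_available = intersect_intervals(u_available, v_available)
--
--         delay = 0
--         for (st, en) in common_available:
--             end_int = min(en, s_e)
--             if end_int > st:
--                 delay += (end_int - st)
--         delays[e_id] = delay
--
--     return delays
-- ===== SOURCE B (Python) =====
-- def calculate_delays(edges, start_times, edges_info):
--     """
--     Same per-edge delays, computed as s_e minus the measure of the UNION of the
--     two endpoints' busy intervals clipped to [0, s_e) (single sorted sweep),
--     instead of building per-node free-interval lists and intersecting them.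
--     """
--     busy = {}
--     for e_id, s_time in start_times.items():
--         n1, n2, w = edges_info[e_id]
--         busy.setdefault(n1, []).append((s_time, s_time + w))
--         busy.setdefault(n2, []).append((s_time, s_time + w))
--
--     delays = {}
--     for (e_id, u, v, w) in edges:
--         s_e = start_times[e_id]
--         if s_e <= 0:
--             delays[e_id] = 0
--             continue
--         ivs = busy.get(u, []) + busy.get(v, [])
--         ivs.sort(key=lambda p: p[0])
--         covered = 0
--         reach = 0
--         for (b_start, b_end) in ivs:
--             if b_start >= s_e:
--                 break
--             lo = max(b_start, reach)
--             hi = min(b_end, s_e)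
--             if hi > lo:
--                 covered += hi - lo
--                 reach = hi
--         delays[e_id] = s_e - covered
--     return delays
-- ===== Notes on version B (the rewrite author's own statement) =====
-- stated objective: simpler
-- what changed: Instead of building per-node free-interval lists (node_busy_intervals + find_availability_intervals) and intersecting them with a two-pointer pass, B merges the two endpoints' busy intervals, sorts them by start, and does one sweep accumulating the covered length of their union clipped to [0, s_e), returning delay = s_e - covered; …
import Mathlib
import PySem

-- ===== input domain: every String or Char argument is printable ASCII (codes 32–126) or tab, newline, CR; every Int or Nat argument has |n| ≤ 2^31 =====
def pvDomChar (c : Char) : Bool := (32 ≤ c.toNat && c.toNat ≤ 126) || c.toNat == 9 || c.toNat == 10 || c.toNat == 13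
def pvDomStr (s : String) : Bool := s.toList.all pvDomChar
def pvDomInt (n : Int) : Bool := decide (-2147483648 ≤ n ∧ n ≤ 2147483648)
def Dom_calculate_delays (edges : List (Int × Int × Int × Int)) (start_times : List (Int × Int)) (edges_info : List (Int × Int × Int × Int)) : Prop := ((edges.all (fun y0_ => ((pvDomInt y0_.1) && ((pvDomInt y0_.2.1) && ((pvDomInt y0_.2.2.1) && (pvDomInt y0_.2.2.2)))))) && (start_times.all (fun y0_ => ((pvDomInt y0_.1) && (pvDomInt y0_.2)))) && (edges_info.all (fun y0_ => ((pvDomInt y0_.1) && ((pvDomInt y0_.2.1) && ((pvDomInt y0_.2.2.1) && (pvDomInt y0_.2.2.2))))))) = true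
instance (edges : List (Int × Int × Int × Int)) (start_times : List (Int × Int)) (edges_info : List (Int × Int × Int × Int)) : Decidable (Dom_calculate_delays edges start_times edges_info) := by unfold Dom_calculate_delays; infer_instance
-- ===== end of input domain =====

-- B replaces A's free-interval construction + intersection with one covered-length sweep
-- over the merged busy intervals (objective: simpler); Pre_ keeps the inputs inside the
-- task's natural domain (see the comment at Pre_).

-- ===== PORT A =====
-- 'busy[n].append(iv)' on a defaultdict(list)
def pvAppendA (d : PySem.Dict Int (List (Int × Int))) (n : Int) (iv : Int × Int) :
    PySem.Dict Int (List (Int × Int)) :=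
  d.modify n [] (fun l => l ++ [iv])

-- node_busy_intervals; 'none' = KeyError on edges_info[e_id]
def node_busy_intervals (start_times : List (Int × Int))
    (edges_info : List (Int × Int × Int × Int)) :
    Option (PySem.Dict Int (List (Int × Int))) :=
  match start_times.foldl
      (fun acc p =>
        match acc with
        | none => none
        | some d =>
          match (PySem.Dict.mk edges_info).get? p.1 with
          | none => none
          | some info =>
            some (pvAppendA (pvAppendA d info.1 (p.2, p.2 + info.2.2))
                    info.2.1 (p.2, p.2 + info.2.2)))
      (some PySem.Dict.empty) with
  | none => none
  | some d =>
    some (PySem.Dict.mk (d.items.map (fun kv =>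
      (kv.1, PySem.List.sorted kv.2 (fun x => x.1)))))

-- the loop of find_availability_intervals (both 'break's become early returns)
def faGo (busy : List (Int × Int)) (current_start : Int) (end_time : Int) :
    List (Int × Int) :=
  match busy with
  | [] => if current_start < end_time then [(current_start, end_time)] else []
  | (b_start, b_end) :: rest =>
    if b_start ≥ end_time then
      (if current_start < end_time then [(current_start, end_time)] else [])
    else
      let free_end := min b_start end_time
      let front := if b_start > current_start ∧ free_end > current_start then
        [(current_start, free_end)] else []
      let cs' := max current_start b_end
      if cs' ≥ end_time then front else front ++ faGo rest cs' end_time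

def find_availability_intervals (busy_intervals : List (Int × Int)) (end_time : Int) :
    List (Int × Int) :=
  faGo busy_intervals 0 end_time

-- the two-pointer while loop; fuel = i-steps + j-steps left, it is never exhausted
def interGo : Nat → List (Int × Int) → List (Int × Int) → List (Int × Int)
  | 0, _, _ => []
  | _ + 1, [], _ => []
  | _ + 1, _, [] => []
  | n + 1, (a_start, a_end) :: ta, (b_start, b_end) :: tb =>
    let start_int := max a_start b_start
    let end_int := min a_end b_end
    let r := if start_int < end_int then [(start_int, end_int)] else []
    if a_end < b_end then r ++ interGo n ta ((b_start, b_end) :: tb)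
    else r ++ interGo n ((a_start, a_end) :: ta) tb

def intersect_intervals (intervals_a intervals_b : List (Int × Int)) : List (Int × Int) :=
  interGo (intervals_a.length + intervals_b.length) intervals_a intervals_b

-- defaultdict access busy[u] also inserts an empty list; that never changes any value
-- read later, so it is ported value-faithfully as getD _ []
def calculate_delays (edges : List (Int × Int × Int × Int)) (start_times : List (Int × Int)) (edges_info : List (Int × Int × Int × Int)) : List (Int × Int) :=
  match node_busy_intervals start_times edges_info with
  | none => []
  | some busy =>
    match edges.foldl
        (fun acc e =>
          match acc with
          | none => none
          | some delays =>
            match (PySem.Dict.mk start_times).get? e.1 with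
            | none => none
            | some s_e =>
              if s_e = 0 then some (delays.insert e.1 0)
              else
                let u_available := find_availability_intervals (busy.getD e.2.1 []) s_e
                let v_available := find_availability_intervals (busy.getD e.2.2.1 []) s_e
                let common := intersect_intervals u_available v_available
                let delay := common.foldl
                  (fun acc2 p =>
                    if min p.2 s_e > p.1 then acc2 + (min p.2 s_e - p.1) else acc2) 0
                some (delays.insert e.1 delay))
        (some PySem.Dict.empty) with
    | none => []
    | some delays => delays.items

-- ===== PORT B =====
-- covered-length sweep over start-sorted intervals, clipped to [0, s_e)
def pvSweep (ivs : List (Int × Int)) (covered reach s_e : Int) : Int :=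
  match ivs with
  | [] => covered
  | (b_start, b_end) :: rest =>
    if b_start ≥ s_e then covered
    else
      let lo := max b_start reach
      let hi := min b_end s_e
      if hi > lo then pvSweep rest (covered + (hi - lo)) hi s_e
      else pvSweep rest covered reach s_e

def calculate_delays_alt (edges : List (Int × Int × Int × Int)) (start_times : List (Int × Int)) (edges_info : List (Int × Int × Int × Int)) : List (Int × Int) :=
  match start_times.foldl
      (fun acc p =>
        match acc with
        | none => none
        | some d =>
          match (PySem.Dict.mk edges_info).get? p.1 with
          | none => none
          | some info =>
            some ((d.modify info.1 [] (fun l => l ++ [(p.2, p.2 + info.2.2)])).modify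
                    info.2.1 [] (fun l => l ++ [(p.2, p.2 + info.2.2)])))
      (some PySem.Dict.empty) with
  | none => []
  | some busy =>
    match edges.foldl
        (fun acc e =>
          match acc with
          | none => none
          | some delays =>
            match (PySem.Dict.mk start_times).get? e.1 with
            | none => none
            | some s_e =>
              if s_e ≤ 0 then some (delays.insert e.1 0)
              else
                let ivs := PySem.List.sorted (busy.getD e.2.1 [] ++ busy.getD e.2.2.1 [])
                  (fun p => p.1)
                some (delays.insert e.1 (s_e - pvSweep ivs 0 0 s_e)))
        (some PySem.Dict.empty) with
    | none => []
    | some delays => delays.items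

-- ===== PRECONDITION & SPEC =====
-- a busy interval of negative width (edges_info weight < 0, a negative transmission time)
-- starting strictly inside an endpoint's window (0, s_e)
def pvNegExposed (edges : List (Int × Int × Int × Int)) (start_times : List (Int × Int)) (edges_info : List (Int × Int × Int × Int)) : Prop :=
  ∃ e ∈ edges, ∃ f ∈ start_times,
    0 < (PySem.Dict.mk start_times).getD e.1 0 ∧
    ((PySem.Dict.mk edges_info).getD f.1 (0, 0, 0)).2.2 < 0 ∧
    (((PySem.Dict.mk edges_info).getD f.1 (0, 0, 0)).1 = e.2.1 ∨
     ((PySem.Dict.mk edges_info).getD f.1 (0, 0, 0)).1 = e.2.2.1 ∨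
     ((PySem.Dict.mk edges_info).getD f.1 (0, 0, 0)).2.1 = e.2.1 ∨
     ((PySem.Dict.mk edges_info).getD f.1 (0, 0, 0)).2.1 = e.2.2.1) ∧
    0 < f.2 ∧ f.2 < (PySem.Dict.mk start_times).getD e.1 0

-- The first two conjuncts exclude exactly the KeyErrors (every start_times key must be an
-- edges_info key, every edge id a start_times key).  The last conjunct excludes inputs with
-- a negative edges_info weight — a negative transmission time, outside the task's natural
-- domain — whose busy interval of negative width starts strictly inside an endpoint's
-- window: there A's free-interval lists overlap and its sum overcounts the common free time
-- (e.g. 10 on a window of size 8), while B returns its exact measure.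
def Pre_calculate_delays (edges : List (Int × Int × Int × Int)) (start_times : List (Int × Int)) (edges_info : List (Int × Int × Int × Int)) : Prop :=
  (∀ p ∈ start_times, ∃ q ∈ edges_info, q.1 = p.1) ∧
  (∀ e ∈ edges, ∃ p ∈ start_times, p.1 = e.1) ∧
  ¬ pvNegExposed edges start_times edges_info
instance (edges : List (Int × Int × Int × Int)) (start_times : List (Int × Int)) (edges_info : List (Int × Int × Int × Int)) : Decidable (Pre_calculate_delays edges start_times edges_info) := by unfold Pre_calculate_delays pvNegExposed; infer_instance

def pvWitness_calculate_delays : (List (Int × Int × Int × Int)) × (List (Int × Int)) × (List (Int × Int × Int × Int)) :=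
  ([(0, 1, 2, 3)], [(0, 5)], [(0, 1, 2, 3)])

def Spec_calculate_delays (edges : List (Int × Int × Int × Int)) (start_times : List (Int × Int)) (edges_info : List (Int × Int × Int × Int)) (out : List (Int × Int)) : Prop :=
  out = calculate_delays_alt edges start_times edges_info
instance (edges : List (Int × Int × Int × Int)) (start_times : List (Int × Int)) (edges_info : List (Int × Int × Int × Int)) (out : List (Int × Int)) : Decidable (Spec_calculate_delays edges start_times edges_info out) := by unfold Spec_calculate_delays; infer_instance

-- ===== CLAIM (what is proved, stated in full; the proofs are below) =====
def Claim_equal_calculate_delays : Prop := ∀ (edges : List (Int × Int × Int × Int)) (start_times : List (Int × Int)) (edges_info : List (Int × Int × Int × Int)), Dom_calculate_delays edges start_times edges_info → Pre_calculate_delays edges start_times edges_info → Spec_calculate_delays edges start_times edges_info (calculate_delays edges start_times edges_info)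

-- ===== LEMMAS AND PROOFS =====

-- x lies in some interval of l (as the half-open set [s, e))
def covb (l : List (Int × Int)) (x : Int) : Bool :=
  l.any (fun p => decide (p.1 ≤ x) && decide (x < p.2))

-- the (node, interval) pairs that the busy-building loop appends, in order
def pvPairs (start_times : List (Int × Int)) (edges_info : List (Int × Int × Int × Int)) :
    List (Int × (Int × Int)) :=
  start_times.flatMap (fun p =>
    match (PySem.Dict.mk edges_info).get? p.1 with
    | some info => [(info.1, (p.2, p.2 + info.2.2)), (info.2.1, (p.2, p.2 + info.2.2))]
    | none => [])

def pvRawBusy (start_times : List (Int × Int)) (edges_info : List (Int × Int × Int × Int)) :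
    PySem.Dict Int (List (Int × Int)) :=
  (pvPairs start_times edges_info).foldl
    (fun d q => d.modify q.1 [] (fun l => l ++ [q.2])) PySem.Dict.empty

lemma covb_append (a b : List (Int × Int)) (x : Int) :
    covb (a ++ b) x = (covb a x || covb b x) := by
  simp [covb, List.any_append]

lemma covb_perm {a b : List (Int × Int)} (h : a.Perm b) (x : Int) :
    covb a x = covb b x := by
  simp [covb, List.Perm.any_eq h]

lemma covb_true_iff (l : List (Int × Int)) (x : Int) :
    covb l x = true ↔ ∃ p ∈ l, p.1 ≤ x ∧ x < p.2 := by
  simp [covb, List.any_eq_true]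

lemma covb_lower {t : List (Int × Int)} {c x : Int}
    (h : ∀ q ∈ t, c ≤ q.1) (hc : covb t x = true) : c ≤ x := by
  simp only [covb, List.any_eq_true, Bool.and_eq_true, decide_eq_true_eq] at hc
  obtain ⟨p, hp, h1, _⟩ := hc
  exact le_trans (h p hp) h1

lemma mk_get?_exists {ν : Type} (l : List (Int × ν)) (k : Int)
    (h : ∃ q ∈ l, q.1 = k) : ∃ v, (PySem.Dict.mk l).get? k = some v := by
  induction l with
  | nil => simp at h
  | cons q t ih =>
    rw [show (q : Int × ν) = (q.1, q.2) from rfl, PySem.Dict.get?_mk_cons]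
    by_cases hq : q.1 == k
    · simp [hq]
    · simp only [hq, Bool.false_eq_true, if_false]
      obtain ⟨r, hr, hrk⟩ := h
      rcases List.mem_cons.mp hr with rfl | hrt
      · simp [hrk] at hq
      · exact ih ⟨r, hrt, hrk⟩

lemma mapvals_get? (f : List (Int × Int) → List (Int × Int))
    (l : List (Int × List (Int × Int))) (k : Int) :
    (PySem.Dict.mk (l.map (fun kv => (kv.1, f kv.2)))).get? k
      = ((PySem.Dict.mk l).get? k).map f := by
  induction l with
  | nil => simp [PySem.Dict.get?]
  | cons q t ih =>
    rw [show (q : Int × List (Int × Int)) = (q.1, q.2) from rfl]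
    simp only [List.map_cons, PySem.Dict.get?_mk_cons]
    by_cases hq : q.1 == k
    · simp [hq]
    · simp [hq, ih]

-- the Option-threaded busy-building fold, under Pre_, is the plain fold over pvPairs
lemma build_eq (start_times : List (Int × Int)) (edges_info : List (Int × Int × Int × Int))
    (h : ∀ p ∈ start_times, ∃ q ∈ edges_info, q.1 = p.1) :
    ∀ d : PySem.Dict Int (List (Int × Int)),
    start_times.foldl
      (fun acc p =>
        match acc with
        | none => none
        | some d =>
          match (PySem.Dict.mk edges_info).get? p.1 with
          | none => none
          | some info =>
            some ((d.modify info.1 [] (fun l => l ++ [(p.2, p.2 + info.2.2)])).modify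
                    info.2.1 [] (fun l => l ++ [(p.2, p.2 + info.2.2)])))
      (some d)
    = some ((pvPairs start_times edges_info).foldl
        (fun d q => d.modify q.1 [] (fun l => l ++ [q.2])) d) := by
  revert h
  induction start_times with
  | nil => intro _ d; simp [pvPairs]
  | cons p t ih =>
    intro h d
    obtain ⟨v, hv⟩ := mk_get?_exists edges_info p.1 (h p (List.mem_cons_self))
    simp only [List.foldl_cons, hv]
    rw [ih (fun q hq => h q (List.mem_cons_of_mem _ hq))]
    congr 1
    simp [pvPairs, List.flatMap_cons, hv]

lemma rawBusy_getD (start_times : List (Int × Int)) (edges_info : List (Int × Int × Int × Int))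
    (u : Int) :
    (pvRawBusy start_times edges_info).getD u []
      = ((pvPairs start_times edges_info).filter (fun q => q.1 == u)).map (fun q => q.2) := by
  simp [pvRawBusy, PySem.Dict.getD_foldl_modify_append]

-- ----- faGo -----

lemma faGo_bounds (bs : List (Int × Int)) (cs se : Int) :
    ∀ p ∈ faGo bs cs se, cs ≤ p.1 ∧ p.1 < p.2 ∧ p.2 ≤ se := by
  induction bs generalizing cs with
  | nil =>
    intro p hp
    simp only [faGo] at hp
    split_ifs at hp with h
    · rcases List.mem_singleton.mp hp with rfl; simp; omega
    · simp at hp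
  | cons q rest ih =>
    intro p hp
    obtain ⟨s, e⟩ := q
    simp only [faGo] at hp
    split_ifs at hp with h1 h2 h3 h4 h5
    · rcases List.mem_singleton.mp hp with rfl; simp; omega
    · simp at hp
    · rcases List.mem_singleton.mp hp with rfl; simp; omega
    · simp at hp
    · rcases List.mem_append.mp hp with hf | hr
      · rcases List.mem_singleton.mp hf with rfl; simp; omega
      · have := ih (max cs e) p hr
        exact ⟨le_trans (le_max_left _ _) this.1, this.2.1, this.2.2⟩
    · simp only [List.nil_append] at hp
      have := ih (max cs e) p hp
      exact ⟨le_trans (le_max_left _ _) this.1, this.2.1, this.2.2⟩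

lemma covb_nil (x : Int) : covb [] x = false := rfl

lemma covb_cons (p : Int × Int) (t : List (Int × Int)) (x : Int) :
    covb (p :: t) x = ((decide (p.1 ≤ x) && decide (x < p.2)) || covb t x) := by
  simp [covb]

lemma faGo_cov (bs : List (Int × Int)) (cs se : Int)
    (hs : bs.Pairwise (fun p q => p.1 ≤ q.1)) (x : Int) :
    covb (faGo bs cs se) x
      = (decide (cs ≤ x) && decide (x < se) && !covb bs x) := by
  induction bs generalizing cs with
  | nil =>
    simp only [faGo]
    split_ifs with h <;> simp only [covb_cons, covb_nil, Bool.or_false] <;>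
      rw [Bool.eq_iff_iff] <;> simp <;> omega
  | cons q rest ih =>
    obtain ⟨s, e⟩ := q
    have hs1 : ∀ r ∈ rest, s ≤ r.1 := (List.pairwise_cons.mp hs).1
    have hs2 : rest.Pairwise (fun p q => p.1 ≤ q.1) := (List.pairwise_cons.mp hs).2
    simp only [faGo]
    split_ifs with h1 h2 h3 h4 h5
    all_goals try rw [covb_append, ih _ hs2]
    all_goals simp only [covb_cons, covb_nil, Bool.or_false]
    all_goals cases hbr : covb rest x
    all_goals try have hsx := covb_lower hs1 hbr
    all_goals rw [Bool.eq_iff_iff]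
    all_goals simp
    all_goals omega

lemma faGo_chain (bs : List (Int × Int)) (cs se : Int)
    (hs : bs.Pairwise (fun p q => p.1 ≤ q.1)) (hcs : 0 ≤ cs)
    (ht : ∀ p ∈ bs, p.1 ≤ p.2 ∨ p.1 ≤ 0 ∨ se ≤ p.1) :
    (faGo bs cs se).Pairwise (fun p q => p.2 ≤ q.1) := by
  induction bs generalizing cs with
  | nil =>
    simp only [faGo]
    split_ifs <;> simp
  | cons q rest ih =>
    obtain ⟨s, e⟩ := q
    have hs2 : rest.Pairwise (fun p q => p.1 ≤ q.1) := (List.pairwise_cons.mp hs).2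
    have ht2 : ∀ p ∈ rest, p.1 ≤ p.2 ∨ p.1 ≤ 0 ∨ se ≤ p.1 :=
      fun p hp => ht p (List.mem_cons_of_mem _ hp)
    have hth := ht (s, e) List.mem_cons_self
    simp only [faGo]
    split_ifs with h1 h2 h3 h4 h5
    · simp
    · simp
    · simp
    · simp
    · apply List.pairwise_append.mpr
      refine ⟨by simp, ih _ hs2 (by omega) ht2, ?_⟩
      intro a ha b hb
      rcases List.mem_singleton.mp ha with rfl
      have hbnd := (faGo_bounds rest (max cs e) se b hb).1
      simp only at hbnd ⊢
      omega
    · rw [List.nil_append]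
      exact ih _ hs2 (by omega) ht2

-- ----- interGo -----

lemma interGo_mem (n : Nat) (a b : List (Int × Int)) :
    ∀ p ∈ interGo n a b, ∃ pa ∈ a, ∃ pb ∈ b,
      p.1 = max pa.1 pb.1 ∧ p.2 = min pa.2 pb.2 ∧ p.1 < p.2 := by
  induction n generalizing a b with
  | zero => intro p hp; simp [interGo] at hp
  | succ n ih =>
    intro p hp
    match a, b with
    | [], _ => simp [interGo] at hp
    | _ :: _, [] => simp [interGo] at hp
    | (as_, ae) :: ta, (bs_, be) :: tb =>
      simp only [interGo] at hp
      split_ifs at hp with hadv hc hc'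
      · rcases List.mem_append.mp hp with hf | hr
        · rcases List.mem_singleton.mp hf with rfl
          exact ⟨(as_, ae), List.mem_cons_self, (bs_, be), List.mem_cons_self, rfl, rfl, hc⟩
        · obtain ⟨pa, hpa, pb, hpb, h⟩ := ih _ _ p hr
          exact ⟨pa, List.mem_cons_of_mem _ hpa, pb, hpb, h⟩
      · rw [List.nil_append] at hp
        obtain ⟨pa, hpa, pb, hpb, h⟩ := ih _ _ p hp
        exact ⟨pa, List.mem_cons_of_mem _ hpa, pb, hpb, h⟩
      · rcases List.mem_append.mp hp with hf | hr
        · rcases List.mem_singleton.mp hf with rfl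
          exact ⟨(as_, ae), List.mem_cons_self, (bs_, be), List.mem_cons_self, rfl, rfl, hc'⟩
        · obtain ⟨pa, hpa, pb, hpb, h⟩ := ih _ _ p hr
          exact ⟨pa, hpa, pb, List.mem_cons_of_mem _ hpb, h⟩
      · rw [List.nil_append] at hp
        obtain ⟨pa, hpa, pb, hpb, h⟩ := ih _ _ p hp
        exact ⟨pa, hpa, pb, List.mem_cons_of_mem _ hpb, h⟩

lemma interGo_chain (n : Nat) (a b : List (Int × Int))
    (ha : a.Pairwise (fun p q => p.2 ≤ q.1)) (hb : b.Pairwise (fun p q => p.2 ≤ q.1)) :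
    (interGo n a b).Pairwise (fun p q => p.2 ≤ q.1) := by
  induction n generalizing a b with
  | zero => simp [interGo]
  | succ n ih =>
    match a, b with
    | [], _ => simp [interGo]
    | _ :: _, [] => simp [interGo]
    | (as_, ae) :: ta, (bs_, be) :: tb =>
      simp only [interGo]
      split_ifs with hadv hc hc'
      · apply List.pairwise_append.mpr
        refine ⟨by simp, ih _ _ (List.pairwise_cons.mp ha).2 hb, ?_⟩
        intro u hu w hw
        rcases List.mem_singleton.mp hu with rfl
        obtain ⟨pa, hpa, pb, hpb, hw1, hw2, hw3⟩ := interGo_mem n ta _ w hw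
        have := (List.pairwise_cons.mp ha).1 pa hpa
        simp only at this ⊢
        omega
      · rw [List.nil_append]
        exact ih _ _ (List.pairwise_cons.mp ha).2 hb
      · apply List.pairwise_append.mpr
        refine ⟨by simp, ih _ _ ha (List.pairwise_cons.mp hb).2, ?_⟩
        intro u hu w hw
        rcases List.mem_singleton.mp hu with rfl
        obtain ⟨pa, hpa, pb, hpb, hw1, hw2, hw3⟩ := interGo_mem n _ tb w hw
        have := (List.pairwise_cons.mp hb).1 pb hpb
        simp only at this ⊢
        omega
      · rw [List.nil_append]
        exact ih _ _ ha (List.pairwise_cons.mp hb).2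

lemma interGo_cov (n : Nat) (a b : List (Int × Int)) (hn : a.length + b.length ≤ n)
    (ha : a.Pairwise (fun p q => p.2 ≤ q.1)) (hb : b.Pairwise (fun p q => p.2 ≤ q.1)) (x : Int) :
    covb (interGo n a b) x = (covb a x && covb b x) := by
  induction n generalizing a b with
  | zero =>
    obtain rfl : a = [] := List.length_eq_zero_iff.mp (by omega)
    simp [interGo, covb_nil]
  | succ n ih =>
    match a, b with
    | [], _ => simp [interGo, covb_nil]
    | _ :: _, [] => simp [interGo, covb_nil]
    | (as_, ae) :: ta, (bs_, be) :: tb =>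
      have hla : ∀ r ∈ ta, ae ≤ r.1 := by
        intro r hr; exact (List.pairwise_cons.mp ha).1 r hr
      have hlb : ∀ r ∈ tb, be ≤ r.1 := by
        intro r hr; exact (List.pairwise_cons.mp hb).1 r hr
      simp only [interGo]
      split_ifs with hadv hc hc'
      all_goals try rw [List.nil_append]
      all_goals try rw [covb_append]
      all_goals try rw [ih ta ((bs_, be) :: tb) (by simp only [List.length_cons] at hn ⊢; omega)
        (List.pairwise_cons.mp ha).2 hb]
      all_goals try rw [ih ((as_, ae) :: ta) tb (by simp only [List.length_cons] at hn ⊢; omega)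
        ha (List.pairwise_cons.mp hb).2]
      all_goals cases hta : covb ta x <;> cases htb : covb tb x
      all_goals try have h1 := covb_lower hla hta
      all_goals try have h2 := covb_lower hlb htb
      all_goals simp only [covb_cons, covb_nil, hta, htb, Bool.or_false]
      all_goals rw [Bool.eq_iff_iff]
      all_goals simp
      all_goals omega

-- ----- measures -----

lemma chain_sum (se : Int) :
    ∀ l : List (Int × Int), l.Pairwise (fun p q => p.2 ≤ q.1) →
    (∀ p ∈ l, 0 ≤ p.1 ∧ p.1 < p.2 ∧ p.2 ≤ se) →
    (l.map (fun p => p.2 - p.1)).sum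
      = (((Finset.Ico (0 : Int) se).filter (fun x => covb l x = true)).card : Int) := by
  intro l hch hb
  induction l with
  | nil => simp [covb_nil]
  | cons p t ih =>
    have hpt : ∀ q ∈ t, p.2 ≤ q.1 := by
      intro q hq; exact (List.pairwise_cons.mp hch).1 q hq
    have hch2 : t.Pairwise (fun p q => p.2 ≤ q.1) := (List.pairwise_cons.mp hch).2
    have hbh := hb p List.mem_cons_self
    have hb2 : ∀ q ∈ t, 0 ≤ q.1 ∧ q.1 < q.2 ∧ q.2 ≤ se :=
      fun q hq => hb q (List.mem_cons_of_mem _ hq)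
    have hset : (Finset.Ico (0 : Int) se).filter (fun x => covb (p :: t) x = true)
        = Finset.Ico p.1 p.2 ∪ (Finset.Ico (0 : Int) se).filter (fun x => covb t x = true) := by
      ext x
      simp only [Finset.mem_filter, Finset.mem_union, Finset.mem_Ico, covb_cons,
        Bool.or_eq_true, Bool.and_eq_true, decide_eq_true_eq]
      cases hbt : covb t x <;> simp <;> omega
    have hdisj : Disjoint (Finset.Ico p.1 p.2)
        ((Finset.Ico (0 : Int) se).filter (fun x => covb t x = true)) := by
      rw [Finset.disjoint_left]
      intro x hx hx2
      simp only [Finset.mem_Ico] at hx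
      simp only [Finset.mem_filter] at hx2
      have := covb_lower hpt hx2.2
      omega
    rw [List.map_cons, List.sum_cons, ih hch2 hb2, hset,
      Finset.card_union_of_disjoint hdisj, Int.card_Ico]
    omega

lemma sweep_card (se : Int) :
    ∀ (ms : List (Int × Int)) (covered reach : Int),
    ms.Pairwise (fun p q => p.1 ≤ q.1) → 0 ≤ reach →
    pvSweep ms covered reach se
      = covered + (((Finset.Ico reach se).filter (fun x => covb ms x = true)).card : Int) := by
  intro ms
  induction ms with
  | nil => intro covered reach _ _; simp [pvSweep, covb_nil]
  | cons q t ih =>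
    intro covered reach hs hreach
    obtain ⟨s, e⟩ := q
    have hs1 : ∀ r ∈ t, s ≤ r.1 := by
      intro r hr; exact (List.pairwise_cons.mp hs).1 r hr
    have hs2 : t.Pairwise (fun p q => p.1 ≤ q.1) := (List.pairwise_cons.mp hs).2
    simp only [pvSweep]
    split_ifs with h1 h2
    · have hempty : (Finset.Ico reach se).filter (fun x => covb ((s, e) :: t) x = true) = ∅ := by
        apply Finset.filter_eq_empty_iff.mpr
        intro x hx
        simp only [Finset.mem_Ico] at hx
        rw [covb_true_iff]
        rintro ⟨r, hr, hz1, hz2⟩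
        rcases List.mem_cons.mp hr with rfl | hrt
        · simp only at hz1 hz2; omega
        · have := hs1 r hrt; omega
      simp [hempty]
    · rw [ih (covered + (min e se - max s reach)) (min e se) hs2 (by omega)]
      have hset : (Finset.Ico reach se).filter (fun x => covb ((s, e) :: t) x = true)
          = Finset.Ico (max s reach) (min e se)
            ∪ (Finset.Ico (min e se) se).filter (fun x => covb t x = true) := by
        ext x
        simp only [Finset.mem_filter, Finset.mem_union, Finset.mem_Ico, covb_cons,
          Bool.or_eq_true, Bool.and_eq_true, decide_eq_true_eq]
        cases hbt : covb t x
        · simp; omega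
        · have hsx := covb_lower hs1 hbt
          simp; omega
      have hdisj : Disjoint (Finset.Ico (max s reach) (min e se))
          ((Finset.Ico (min e se) se).filter (fun x => covb t x = true)) := by
        rw [Finset.disjoint_left]
        intro x hx hx2
        simp only [Finset.mem_Ico] at hx
        simp only [Finset.mem_filter, Finset.mem_Ico] at hx2
        omega
      rw [hset, Finset.card_union_of_disjoint hdisj, Int.card_Ico]
      omega
    · rw [ih covered reach hs2 hreach]
      have hset : (Finset.Ico reach se).filter (fun x => covb ((s, e) :: t) x = true)
          = (Finset.Ico reach se).filter (fun x => covb t x = true) := by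
        ext x
        simp only [Finset.mem_filter, Finset.mem_Ico, covb_cons,
          Bool.or_eq_true, Bool.and_eq_true, decide_eq_true_eq]
        cases hbt : covb t x <;> simp <;> omega
      rw [hset]

-- ----- per-edge equality -----

lemma delay_eq (Lu Lv : List (Int × Int)) (se : Int) (hse : 0 < se)
    (htu : ∀ p ∈ Lu, p.1 ≤ p.2 ∨ p.1 ≤ 0 ∨ se ≤ p.1)
    (htv : ∀ p ∈ Lv, p.1 ≤ p.2 ∨ p.1 ≤ 0 ∨ se ≤ p.1) :
    (intersect_intervals
        (find_availability_intervals (PySem.List.sorted Lu (fun x => x.1)) se)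
        (find_availability_intervals (PySem.List.sorted Lv (fun x => x.1)) se)).foldl
      (fun acc2 p => if min p.2 se > p.1 then acc2 + (min p.2 se - p.1) else acc2) 0
    = se - pvSweep (PySem.List.sorted (Lu ++ Lv) (fun p => p.1)) 0 0 se := by
  simp only [find_availability_intervals, intersect_intervals]
  have hpermu : (PySem.List.sorted Lu (fun x => x.1)).Perm Lu := PySem.List.sorted_perm _ _ _
  have hpermv : (PySem.List.sorted Lv (fun x => x.1)).Perm Lv := PySem.List.sorted_perm _ _ _
  have hpermm : (PySem.List.sorted (Lu ++ Lv) (fun p => p.1)).Perm (Lu ++ Lv) :=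
    PySem.List.sorted_perm _ _ _
  have hpu : (PySem.List.sorted Lu (fun x => x.1)).Pairwise (fun p q => p.1 ≤ q.1) :=
    PySem.List.sorted_pairwise _ _
  have hpv : (PySem.List.sorted Lv (fun x => x.1)).Pairwise (fun p q => p.1 ≤ q.1) :=
    PySem.List.sorted_pairwise _ _
  have hpm : (PySem.List.sorted (Lu ++ Lv) (fun p => p.1)).Pairwise (fun p q => p.1 ≤ q.1) :=
    PySem.List.sorted_pairwise _ _
  have htu' : ∀ p ∈ PySem.List.sorted Lu (fun x => x.1), p.1 ≤ p.2 ∨ p.1 ≤ 0 ∨ se ≤ p.1 :=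
    fun p hp => htu p (hpermu.subset hp)
  have htv' : ∀ p ∈ PySem.List.sorted Lv (fun x => x.1), p.1 ≤ p.2 ∨ p.1 ≤ 0 ∨ se ≤ p.1 :=
    fun p hp => htv p (hpermv.subset hp)
  have hcu := faGo_chain (PySem.List.sorted Lu (fun x => x.1)) 0 se hpu le_rfl htu'
  have hcv := faGo_chain (PySem.List.sorted Lv (fun x => x.1)) 0 se hpv le_rfl htv'
  have hbu := faGo_bounds (PySem.List.sorted Lu (fun x => x.1)) 0 se
  have hbv := faGo_bounds (PySem.List.sorted Lv (fun x => x.1)) 0 se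
  have hcc := interGo_chain
    ((faGo (PySem.List.sorted Lu (fun x => x.1)) 0 se).length
      + (faGo (PySem.List.sorted Lv (fun x => x.1)) 0 se).length)
    _ _ hcu hcv
  have hbc : ∀ p ∈ interGo
      ((faGo (PySem.List.sorted Lu (fun x => x.1)) 0 se).length
        + (faGo (PySem.List.sorted Lv (fun x => x.1)) 0 se).length)
      (faGo (PySem.List.sorted Lu (fun x => x.1)) 0 se)
      (faGo (PySem.List.sorted Lv (fun x => x.1)) 0 se),
      0 ≤ p.1 ∧ p.1 < p.2 ∧ p.2 ≤ se := by
    intro p hp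
    obtain ⟨pa, hpa, pb, hpb, h1, h2, h3⟩ := interGo_mem _ _ _ p hp
    have ba := hbu pa hpa
    have bb := hbv pb hpb
    omega
  have hfold : (interGo
      ((faGo (PySem.List.sorted Lu (fun x => x.1)) 0 se).length
        + (faGo (PySem.List.sorted Lv (fun x => x.1)) 0 se).length)
      (faGo (PySem.List.sorted Lu (fun x => x.1)) 0 se)
      (faGo (PySem.List.sorted Lv (fun x => x.1)) 0 se)).foldl
        (fun acc2 p => if min p.2 se > p.1 then acc2 + (min p.2 se - p.1) else acc2) 0
      = ((interGo
      ((faGo (PySem.List.sorted Lu (fun x => x.1)) 0 se).length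
        + (faGo (PySem.List.sorted Lv (fun x => x.1)) 0 se).length)
      (faGo (PySem.List.sorted Lu (fun x => x.1)) 0 se)
      (faGo (PySem.List.sorted Lv (fun x => x.1)) 0 se)).map (fun p => p.2 - p.1)).sum := by
    rw [PySem.List.foldl_congr_mem _ _ (fun acc2 p => acc2 + (p.2 - p.1)) 0 ?_]
    · rw [PySem.List.foldl_add]
      simp
    · intro acc p hp
      have hb := hbc p hp
      rw [min_eq_left (by omega), if_pos (by omega)]
  rw [hfold, chain_sum se _ hcc hbc]
  have hfc : (Finset.Ico (0 : Int) se).filter (fun x => covb (interGo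
      ((faGo (PySem.List.sorted Lu (fun x => x.1)) 0 se).length
        + (faGo (PySem.List.sorted Lv (fun x => x.1)) 0 se).length)
      (faGo (PySem.List.sorted Lu (fun x => x.1)) 0 se)
      (faGo (PySem.List.sorted Lv (fun x => x.1)) 0 se)) x = true)
      = (Finset.Ico (0 : Int) se).filter
        (fun x => ¬ (covb (PySem.List.sorted (Lu ++ Lv) (fun p => p.1)) x = true)) := by
    apply Finset.filter_congr
    intro x hx
    simp only [Finset.mem_Ico] at hx
    rw [interGo_cov _ _ _ le_rfl hcu hcv, faGo_cov _ 0 se hpu x, faGo_cov _ 0 se hpv x,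
      covb_perm hpermm x, covb_append, covb_perm hpermu x, covb_perm hpermv x]
    cases covb Lu x <;> cases covb Lv x <;> simp [hx.1, hx.2]
  rw [hfc]
  have hsw := sweep_card se (PySem.List.sorted (Lu ++ Lv) (fun p => p.1)) 0 0 hpm le_rfl
  rw [hsw]
  have hcard := Finset.card_filter_add_card_filter_not
    (s := Finset.Ico (0 : Int) se)
    (p := fun x => covb (PySem.List.sorted (Lu ++ Lv) (fun p => p.1)) x = true)
  have hIco : (Finset.Ico (0 : Int) se).card = se.toNat := by
    rw [Int.card_Ico]; simp
  omega

lemma delay_neg (Lu Lv : List (Int × Int)) (se : Int) (hse : se < 0) :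
    (intersect_intervals
        (find_availability_intervals Lu se)
        (find_availability_intervals Lv se)).foldl
      (fun acc2 p => if min p.2 se > p.1 then acc2 + (min p.2 se - p.1) else acc2) 0 = 0 := by
  simp only [find_availability_intervals, intersect_intervals]
  have hnil : interGo ((faGo Lu 0 se).length + (faGo Lv 0 se).length)
      (faGo Lu 0 se) (faGo Lv 0 se) = [] := by
    rw [List.eq_nil_iff_forall_not_mem]
    intro p hp
    obtain ⟨pa, hpa, pb, hpb, h1, h2, h3⟩ := interGo_mem _ _ _ p hp
    have ba := faGo_bounds Lu 0 se pa hpa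
    have bb := faGo_bounds Lv 0 se pb hpb
    omega
  rw [hnil]
  rfl

lemma sortedDict_getD (raw : PySem.Dict Int (List (Int × Int))) (u : Int) :
    (PySem.Dict.mk (raw.items.map (fun kv =>
        (kv.1, PySem.List.sorted kv.2 (fun x => x.1))))).getD u []
      = PySem.List.sorted (raw.getD u []) (fun x => x.1) := by
  rw [PySem.Dict.getD_eq_get?_getD, PySem.Dict.getD_eq_get?_getD,
    mapvals_get? (fun l => PySem.List.sorted l (fun x => x.1)) raw.items u]
  have hmk : PySem.Dict.mk raw.items = raw := PySem.Dict.ext_iff.mpr rfl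
  rw [hmk]
  cases h : raw.get? u with
  | none =>
    simp only [Option.map_none, Option.getD_none]
    exact ((PySem.List.sorted_eq_nil_iff _ _ _).mpr rfl).symm
  | some l => simp

lemma tame_of_notD (edges : List (Int × Int × Int × Int)) (st : List (Int × Int))
    (ei : List (Int × Int × Int × Int))
    (hnd : ¬ pvNegExposed edges st ei)
    (e : Int × Int × Int × Int) (he : e ∈ edges) (se : Int)
    (hse : (PySem.Dict.mk st).get? e.1 = some se) (hpos : 0 < se)
    (u : Int) (hu : u = e.2.1 ∨ u = e.2.2.1) :
    ∀ p ∈ (pvRawBusy st ei).getD u [], p.1 ≤ p.2 ∨ p.1 ≤ 0 ∨ se ≤ p.1 := by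
  intro p hp
  rw [rawBusy_getD] at hp
  simp only [List.mem_map, List.mem_filter, beq_iff_eq] at hp
  obtain ⟨q, ⟨hqmem, hqu⟩, rfl⟩ := hp
  simp only [pvPairs, List.mem_flatMap] at hqmem
  obtain ⟨f, hf, hq⟩ := hqmem
  cases hinfo : (PySem.Dict.mk ei).get? f.1 with
  | none => rw [hinfo] at hq; simp at hq
  | some info =>
    rw [hinfo] at hq
    by_cases hw : 0 ≤ info.2.2
    · rcases List.mem_cons.mp hq with rfl | hq2
      · simp only; omega
      · rcases List.mem_cons.mp hq2 with rfl | hq3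
        · simp only; omega
        · simp at hq3
    · have hiv : q.2 = (f.2, f.2 + info.2.2) := by
        rcases List.mem_cons.mp hq with rfl | hq2
        · rfl
        · rcases List.mem_cons.mp hq2 with rfl | hq3
          · rfl
          · simp at hq3
      rw [hiv]
      simp only
      by_contra hcon
      push_neg at hcon
      apply hnd
      refine ⟨e, he, f, hf, ?_, ?_, ?_, by omega, ?_⟩
      · rw [PySem.Dict.getD_eq_get?_getD, hse]; simpa using hpos
      · rw [PySem.Dict.getD_eq_get?_getD, hinfo]; simpa using (by omega : info.2.2 < 0)
      · rw [PySem.Dict.getD_eq_get?_getD, hinfo]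
        simp only [Option.getD_some]
        rcases List.mem_cons.mp hq with rfl | hq2
        · simp only at hqu
          rcases hu with rfl | rfl
          · exact Or.inl hqu
          · exact Or.inr (Or.inl hqu)
        · rcases List.mem_cons.mp hq2 with rfl | hq3
          · simp only at hqu
            rcases hu with rfl | rfl
            · exact Or.inr (Or.inr (Or.inl hqu))
            · exact Or.inr (Or.inr (Or.inr hqu))
          · simp at hq3
      · rw [PySem.Dict.getD_eq_get?_getD, hse]
        simpa using (by omega : f.2 < se)

lemma outer_eq (edges : List (Int × Int × Int × Int)) (st : List (Int × Int))
    (sdict raw : PySem.Dict Int (List (Int × Int)))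
    (hsd : ∀ u, sdict.getD u [] = PySem.List.sorted (raw.getD u []) (fun x => x.1))
    (hp2 : ∀ e ∈ edges, ∃ p ∈ st, p.1 = e.1)
    (htame : ∀ e ∈ edges, ∀ se, (PySem.Dict.mk st).get? e.1 = some se → 0 < se →
      ∀ u, (u = e.2.1 ∨ u = e.2.2.1) →
      ∀ p ∈ raw.getD u [], p.1 ≤ p.2 ∨ p.1 ≤ 0 ∨ se ≤ p.1)
    (d0 : PySem.Dict Int Int) :
    edges.foldl (fun acc e =>
      match acc with
      | none => none
      | some delays =>
        match (PySem.Dict.mk st).get? e.1 with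
        | none => none
        | some s_e =>
          if s_e = 0 then some (delays.insert e.1 0)
          else
            let u_available := find_availability_intervals (sdict.getD e.2.1 []) s_e
            let v_available := find_availability_intervals (sdict.getD e.2.2.1 []) s_e
            let common := intersect_intervals u_available v_available
            let delay := common.foldl
              (fun acc2 p =>
                if min p.2 s_e > p.1 then acc2 + (min p.2 s_e - p.1) else acc2) 0
            some (delays.insert e.1 delay)) (some d0)
    = edges.foldl (fun acc e =>
      match acc with
      | none => none
      | some delays =>
        match (PySem.Dict.mk st).get? e.1 with
        | none => none
        | some s_e =>
          if s_e ≤ 0 then some (delays.insert e.1 0)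
          else
            let ivs := PySem.List.sorted (raw.getD e.2.1 [] ++ raw.getD e.2.2.1 [])
              (fun p => p.1)
            some (delays.insert e.1 (s_e - pvSweep ivs 0 0 s_e))) (some d0) := by
  apply PySem.List.foldl_congr_mem
  intro acc e he
  cases acc with
  | none => rfl
  | some dl =>
    obtain ⟨p0, hp0, hp0e⟩ := hp2 e he
    obtain ⟨s_e, hse⟩ := mk_get?_exists st e.1 ⟨p0, hp0, hp0e⟩
    simp only [hse]
    by_cases h0 : s_e = 0
    · subst h0; norm_num
    · rw [if_neg h0]
      by_cases hneg : s_e ≤ 0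
      · rw [if_pos hneg]
        have hlt : s_e < 0 := by omega
        simp only [hsd]
        rw [delay_neg _ _ s_e hlt]
      · rw [if_neg hneg]
        have hpos : 0 < s_e := by omega
        simp only [hsd]
        rw [delay_eq _ _ s_e hpos (htame e he s_e hse hpos _ (Or.inl rfl))
          (htame e he s_e hse hpos _ (Or.inr rfl))]

-- ===== VERDICT (by name: the statement is the Claim_ definition above) =====
theorem calculate_delays_spec : Claim_equal_calculate_delays := by
  intro edges st ei hdom hpre
  obtain ⟨hp1, hp2, hnd⟩ := hpre
  unfold Spec_calculate_delays
  unfold calculate_delays calculate_delays_alt node_busy_intervals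
  simp only [pvAppendA]
  rw [build_eq st ei hp1 PySem.Dict.empty]
  rw [show (pvPairs st ei).foldl (fun d q => d.modify q.1 [] (fun l => l ++ [q.2]))
      PySem.Dict.empty = pvRawBusy st ei from rfl]
  simp only []
  rw [outer_eq edges st _ (pvRawBusy st ei) (fun u => sortedDict_getD _ u) hp2
    (fun e he se hse hpos u hu => tame_of_notD edges st ei hnd e he se hse hpos u hu)
    PySem.Dict.empty]
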